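-- pv_equiv track=rewrite | github.com/tinatavakolifar/circuit-_design | circuit_design.py | remove_constant_columns
-- ===== SOURCE A (Python) =====
-- def remove_constant_columns(data_rows, subheader):
--     """
--     Remove columns that are constant (all 0s or all 1s) from consideration.
--
--     Args:
--         data_rows (list of list): Rows of CSV data (excluding headers).
--         subheader (list of str): Column names.
--
--     Returns:
--         list: Filtered subheader with constant columns removed.
--     """
--     active_cols = []
--     for i, name in enumerate(subheader):
--         values = [row[i] for row in data_rows if i < len(row)]
--         if not values:
--             continue
--         if len(set(values)) == 1:  # all 0s or all 1s
--             continue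
--         active_cols.append(name)
--     return active_cols
-- ===== SOURCE B (Python) =====
-- def remove_constant_columns(data_rows, subheader):
--     """Single row-major pass: per-column (seen, first, varies) accumulators."""
--     n = len(subheader)
--     seen = [False] * n
--     first = [0] * n
--     varies = [False] * n
--     for row in data_rows:
--         m = min(n, len(row))
--         for i in range(m):
--             v = row[i]
--             if not seen[i]:
--                 seen[i] = True
--                 first[i] = v
--             elif v != first[i]:
--                 varies[i] = True
--     return [name for i, name in enumerate(subheader) if seen[i] and varies[i]]
-- ===== Notes on version B (the rewrite author's own statement) =====
-- stated objective: faster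
-- what changed: Replaces the column-major pass (building and hashing each whole column list per header name) with a single row-major pass maintaining per-column seen/first/varies accumulators, then filters the header once.
import Mathlib
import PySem

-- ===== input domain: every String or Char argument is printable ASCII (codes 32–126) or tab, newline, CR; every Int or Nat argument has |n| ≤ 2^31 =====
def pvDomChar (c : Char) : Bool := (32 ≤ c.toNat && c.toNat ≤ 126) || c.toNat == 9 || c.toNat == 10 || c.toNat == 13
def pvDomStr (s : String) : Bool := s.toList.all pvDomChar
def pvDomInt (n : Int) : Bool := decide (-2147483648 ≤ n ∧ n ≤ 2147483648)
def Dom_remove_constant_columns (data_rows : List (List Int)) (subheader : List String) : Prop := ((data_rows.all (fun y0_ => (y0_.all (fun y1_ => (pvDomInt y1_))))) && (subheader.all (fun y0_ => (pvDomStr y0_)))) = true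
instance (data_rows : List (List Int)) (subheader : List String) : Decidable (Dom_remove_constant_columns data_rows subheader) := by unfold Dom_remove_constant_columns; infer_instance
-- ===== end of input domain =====

-- B replaces A's column-major pass (a column list and a set per header) with one
-- row-major pass over the data maintaining per-column seen/first/varies accumulators.


-- ===== PORT A =====
-- values = [row[i] for row in data_rows if i < len(row)] ; skip empty / single-valued columns
def remove_constant_columns (data_rows : List (List Int)) (subheader : List String) : List String :=
  (PySem.List.enumerate subheader).foldl (fun active_cols p =>
    let values := data_rows.filterMap (fun row =>
      if p.1 < (row.length : Int) then PySem.List.pyGet? row p.1 else none)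
    if values = [] then active_cols
    else if (PySem.Set.ofList values).length = 1 then active_cols
    else active_cols ++ [p.2]) []

-- ===== PORT B =====
-- one column's accumulator update: (seen, first, varies)
def colStep (s : Bool × Int × Bool) (v : Int) : Bool × Int × Bool :=
  if !s.1 then (true, v, s.2.2)
  else if v != s.2.1 then (s.1, s.2.1, true)
  else s

-- inner 'for i in range(min(n, len(row)))' loop: walk the state list with the index
def rowStep (row : List Int) : Nat → List (Bool × Int × Bool) → List (Bool × Int × Bool)
  | _, [] => []
  | i, s :: rest =>
    (match PySem.List.pyGet? row (i : Int) with
     | some v => colStep s v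
     | none => s) :: rowStep row (i + 1) rest

-- final comprehension: keep name where seen[i] and varies[i]
def keepNames : List String → List (Bool × Int × Bool) → List String
  | [], _ => []
  | _ :: _, [] => []
  | n :: ns, s :: ss => if s.1 && s.2.2 then n :: keepNames ns ss else keepNames ns ss

def remove_constant_columns_alt (data_rows : List (List Int)) (subheader : List String) : List String :=
  let init := subheader.map (fun _ => (false, (0 : Int), false))
  let fin := data_rows.foldl (fun st row => rowStep row 0 st) init
  keepNames subheader fin

-- ===== PRECONDITION & SPEC =====
def Spec_remove_constant_columns (data_rows : List (List Int)) (subheader : List String) (out : List String) : Prop := out = remove_constant_columns_alt data_rows subheader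
instance (data_rows : List (List Int)) (subheader : List String) (out : List String) : Decidable (Spec_remove_constant_columns data_rows subheader out) := by unfold Spec_remove_constant_columns; infer_instance

-- ===== CLAIM (what is proved, stated in full; the proofs are below) =====
def Claim_equal_remove_constant_columns : Prop := ∀ (data_rows : List (List Int)) (subheader : List String), Dom_remove_constant_columns data_rows subheader → Spec_remove_constant_columns data_rows subheader (remove_constant_columns data_rows subheader)

-- ===== LEMMAS AND PROOFS =====

-- the values of column n, as both programs effectively see them
def colVals (rows : List (List Int)) (n : Nat) : List Int :=
  rows.filterMap (fun row => row[n]?)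

theorem a_guard_eq (n : Nat) (rows : List (List Int)) :
    rows.filterMap (fun row =>
      if ((n : Int)) < (row.length : Int) then PySem.List.pyGet? row (n : Int) else none)
    = colVals rows n := by
  unfold colVals
  congr 1
  funext row
  by_cases h : ((n : Int)) < (row.length : Int)
  · simp [h]
  · have hn : row.length ≤ n := by exact_mod_cast not_lt.mp h
    simp [h, List.getElem?_eq_none hn]

theorem fold_rowStep_cons (rows : List (List Int)) (n : Nat) (s : Bool × Int × Bool)
    (rest : List (Bool × Int × Bool)) :
    rows.foldl (fun st row => rowStep row n st) (s :: rest)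
    = rows.foldl (fun s row =>
        match PySem.List.pyGet? row (n : Int) with
        | some v => colStep s v
        | none => s) s
      :: rows.foldl (fun st row => rowStep row (n + 1) st) rest := by
  induction rows generalizing s rest with
  | nil => rfl
  | cons r rs ih => simp only [List.foldl_cons, rowStep]; exact ih _ _

theorem colfold_eq (rows : List (List Int)) (n : Nat) (s : Bool × Int × Bool) :
    rows.foldl (fun s row =>
        match PySem.List.pyGet? row (n : Int) with
        | some v => colStep s v
        | none => s) s
    = (colVals rows n).foldl colStep s := by
  induction rows generalizing s with
  | nil => rfl
  | cons r rs ih =>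
    simp only [List.foldl_cons, colVals, List.filterMap_cons, PySem.List.pyGet?_natCast]
    cases h : r[n]? with
    | none => simpa [colVals] using ih s
    | some v => simpa [colVals] using ih (colStep s v)

theorem seen_fold (vs : List Int) (v : Int) (b : Bool) :
    vs.foldl colStep (true, v, b) = (true, v, b || vs.any (fun x => x != v)) := by
  induction vs generalizing b with
  | nil => simp
  | cons x xs ih =>
    simp only [List.foldl_cons, List.any_cons]
    cases hx : x != v with
    | true => simp [colStep, hx, ih]
    | false => simp [colStep, hx, ih]

theorem set_len_one_iff (v : Int) (rest : List Int) :
    (PySem.Set.ofList (v :: rest)).length = 1 ↔ rest.all (fun x => x == v) := by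
  constructor
  · intro h
    obtain ⟨a, ha⟩ := List.length_eq_one_iff.mp h
    have hv : v ∈ PySem.Set.ofList (v :: rest) := by
      rw [PySem.Set.mem_ofList]; exact List.mem_cons_self ..
    rw [ha] at hv
    have hva : v = a := by simpa using hv
    rw [List.all_eq_true]
    intro x hx
    have hxS : x ∈ PySem.Set.ofList (v :: rest) := by
      rw [PySem.Set.mem_ofList]; exact List.mem_cons_of_mem _ hx
    rw [ha] at hxS
    simp only [List.mem_singleton] at hxS
    simp [hxS, hva]
  · intro h
    have hall : ∀ x ∈ PySem.Set.ofList (v :: rest), x = v := by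
      intro x hx
      rw [PySem.Set.mem_ofList] at hx
      rcases List.mem_cons.mp hx with h1 | h2
      · exact h1
      · have := List.all_eq_true.mp h x h2; simpa using this
    have hv : v ∈ PySem.Set.ofList (v :: rest) := by
      rw [PySem.Set.mem_ofList]; exact List.mem_cons_self ..
    have hnd : (PySem.Set.ofList (v :: rest)).Nodup := PySem.Set.nodup_ofList _
    cases hS : PySem.Set.ofList (v :: rest) with
    | nil => rw [hS] at hv; cases hv
    | cons a t =>
      cases ht : t with
      | nil => simp
      | cons b t' =>
        exfalso
        rw [hS, ht] at hall hnd
        have ha : a = v := hall a (by simp)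
        have hb : b = v := hall b (by simp)
        rw [List.nodup_cons] at hnd
        exact hnd.1 (by simp [ha, hb])

theorem main_lemma (rows : List (List Int)) :
    ∀ (ns : List String) (n : Nat) (acc : List String),
    (PySem.List.enumerate ns (n : Int)).foldl (fun active_cols p =>
      let values := rows.filterMap (fun row =>
        if p.1 < (row.length : Int) then PySem.List.pyGet? row p.1 else none)
      if values = [] then active_cols
      else if (PySem.Set.ofList values).length = 1 then active_cols
      else active_cols ++ [p.2]) acc
    = acc ++ keepNames ns (rows.foldl (fun st row => rowStep row n st)
        (ns.map (fun _ => (false, (0 : Int), false)))) := by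
  intro ns
  induction ns with
  | nil =>
    intro n acc
    simp [PySem.List.enumerate_nil, keepNames]
  | cons name ns ih =>
    intro n acc
    rw [PySem.List.enumerate_cons, List.foldl_cons]
    have hcast : ((n : Int)) + 1 = ((n + 1 : Nat) : Int) := by push_cast; ring
    rw [hcast, ih (n + 1)]
    rw [List.map_cons, fold_rowStep_cons, colfold_eq]
    cases hvs : colVals rows n with
    | nil =>
      rw [a_guard_eq, hvs]
      simp [keepNames]
    | cons v rest =>
      have hstate : (v :: rest).foldl colStep (false, (0 : Int), false)
          = (true, v, rest.any (fun x => x != v)) := by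
        rw [List.foldl_cons]
        have : colStep (false, (0 : Int), false) v = (true, v, false) := by
          simp [colStep]
        rw [this, seen_fold]; simp
      rw [a_guard_eq, hvs, hstate]
      by_cases hany : rest.any (fun x => x != v) = true
      · have hne : ¬ (PySem.Set.ofList (v :: rest)).length = 1 := by
          rw [set_len_one_iff]
          rw [List.any_eq_true] at hany
          obtain ⟨x, hx, hxv⟩ := hany
          intro hall
          have := List.all_eq_true.mp hall x hx
          simp_all
        simp [hne, keepNames, hany]
      · have heq : (PySem.Set.ofList (v :: rest)).length = 1 := by
          rw [set_len_one_iff, List.all_eq_true]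
          intro x hx
          have hxv : ¬ (x != v) = true := fun hh => hany (List.any_eq_true.mpr ⟨x, hx, hh⟩)
          simpa using hxv
        have hany' : rest.any (fun x => x != v) = false := by
          simpa using hany
        simp [heq, keepNames, hany']

-- ===== VERDICT (by name: the statement is the Claim_ definition above) =====
theorem remove_constant_columns_spec : Claim_equal_remove_constant_columns := by
  intro data_rows subheader _
  unfold Spec_remove_constant_columns remove_constant_columns remove_constant_columns_alt
  have := main_lemma data_rows subheader 0 []
  simpa using this
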